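-- pv_equiv track=rewrite | github.com/myvonneflores/found | companies/cities.py | city_filter_variants
-- ===== SOURCE A (Python) =====
-- CITY_ALIASES = {
--     "Gresham": "Portland",
--     "Brooklyn": "New York",
--     "Woodstock": "New York",
--     "Long Beach": "Los Angeles",
--     "Venice": "Los Angeles",
--     "West Hollywood": "Los Angeles",
-- }
--
-- def canonicalize_city(value):
--     city = (value or "").strip()
--     if not city:
--         return ""
--     return CITY_ALIASES.get(city, city)
--
-- def city_filter_variants(value):
--     city = canonicalize_city(value)
--     if not city:
--         return []
--
--     variants = {city}
--     for alias, canonical in CITY_ALIASES.items():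
--         if canonical == city:
--             variants.add(alias)
--     return sorted(variants)
-- ===== SOURCE B (Python) =====
-- CITY_ALIASES = {
--     "Gresham": "Portland",
--     "Brooklyn": "New York",
--     "Woodstock": "New York",
--     "Long Beach": "Los Angeles",
--     "Venice": "Los Angeles",
--     "West Hollywood": "Los Angeles",
-- }
--
-- # Precomputed answer table: canonical -> the final sorted variant list
-- # (canonical itself plus all its aliases), built once at module load.
-- VARIANTS_BY_CANONICAL = {}
-- for _alias, _canonical in CITY_ALIASES.items():
--     VARIANTS_BY_CANONICAL.setdefault(_canonical, [_canonical]).append(_alias)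
-- for _canonical in VARIANTS_BY_CANONICAL:
--     VARIANTS_BY_CANONICAL[_canonical].sort()
--
-- def canonicalize_city(value):
--     city = (value or "").strip()
--     if not city:
--         return ""
--     return CITY_ALIASES.get(city, city)
--
-- def city_filter_variants(value):
--     city = canonicalize_city(value)
--     if not city:
--         return []
--     return list(VARIANTS_BY_CANONICAL.get(city, [city]))
-- ===== Notes on version B (the rewrite author's own statement) =====
-- stated objective: alternative
-- what changed: B precomputes, once at module load, a table mapping each canonical city to its complete final sorted variant list; the per-call set-building, alias scan and sort of A are all replaced by a single table lookup with [city] as fallback.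
import Mathlib
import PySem

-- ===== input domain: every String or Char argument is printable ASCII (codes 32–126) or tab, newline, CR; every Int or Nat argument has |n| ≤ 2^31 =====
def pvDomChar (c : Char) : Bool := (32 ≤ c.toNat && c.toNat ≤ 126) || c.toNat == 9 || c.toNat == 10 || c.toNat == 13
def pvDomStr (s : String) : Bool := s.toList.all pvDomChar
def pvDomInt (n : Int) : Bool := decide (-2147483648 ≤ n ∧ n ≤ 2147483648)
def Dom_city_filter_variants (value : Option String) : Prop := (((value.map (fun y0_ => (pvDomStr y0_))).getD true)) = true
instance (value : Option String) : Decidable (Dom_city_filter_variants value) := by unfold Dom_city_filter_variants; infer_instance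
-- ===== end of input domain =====

-- B precomputes the complete sorted answer per canonical city once at module load; each call is a table lookup with [city] fallback (alternative decomposition, not claimed faster).

-- ===== PORT A =====
def CITY_ALIASES : PySem.Dict String String := PySem.Dict.ofList
  [("Gresham", "Portland"), ("Brooklyn", "New York"), ("Woodstock", "New York"),
   ("Long Beach", "Los Angeles"), ("Venice", "Los Angeles"), ("West Hollywood", "Los Angeles")]

def canonicalize_city (value : Option String) : String :=
  let city := PySem.Str.strip (value.getD "")
  if city = "" then "" else CITY_ALIASES.getD city city

def city_filter_variants (value : Option String) : List String :=
  let city := canonicalize_city value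
  if city = "" then []
  else
    let variants := CITY_ALIASES.items.foldl
      (fun v (p : String × String) => if p.2 == city then PySem.Set.add v p.1 else v)
      (PySem.Set.ofList [city])
    PySem.List.sorted variants (fun x => x) false

-- ===== PORT B =====
-- answer table built once: canonical -> sorted list of canonical + its aliases,
-- grouped via setdefault then each group sorted in place (second loop over keys)
def VARIANTS_BY_CANONICAL : PySem.Dict String (List String) :=
  let d := CITY_ALIASES.items.foldl
    (fun d (p : String × String) => d.modify p.2 [p.2] (fun l => l ++ [p.1]))
    PySem.Dict.empty
  d.keys.foldl (fun d2 c => d2.modify c [] (fun l => PySem.List.sorted l (fun x => x) false)) d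

def city_filter_variants_alt (value : Option String) : List String :=
  let city := canonicalize_city value
  if city = "" then []
  else VARIANTS_BY_CANONICAL.getD city [city]

-- ===== PRECONDITION & SPEC =====
def Spec_city_filter_variants (value : Option String) (out : List String) : Prop := out = city_filter_variants_alt value
instance (value : Option String) (out : List String) : Decidable (Spec_city_filter_variants value out) := by unfold Spec_city_filter_variants; infer_instance

-- ===== CLAIM (what is proved, stated in full; the proofs are below) =====
def Claim_equal_city_filter_variants : Prop := ∀ (value : Option String), Dom_city_filter_variants value → Spec_city_filter_variants value (city_filter_variants value)

-- ===== LEMMAS AND PROOFS =====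

-- both ports branch only on the canonical city c; this is their common non-empty body
theorem body_eq (c : String) :
    PySem.List.sorted
      (CITY_ALIASES.items.foldl
        (fun v (p : String × String) => if p.2 == c then PySem.Set.add v p.1 else v)
        (PySem.Set.ofList [c])) (fun x => x) false
    = VARIANTS_BY_CANONICAL.getD c [c] := by
  by_cases h1 : c = "Portland"
  · subst h1
    simp [CITY_ALIASES, VARIANTS_BY_CANONICAL, PySem.Dict.ofList, PySem.Dict.update, PySem.Dict.getD,
      PySem.Dict.get?, PySem.Dict.empty, PySem.Dict.modify, PySem.Dict.insert, PySem.Dict.contains,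
      PySem.Dict.keys, PySem.Set.ofList, PySem.Set.add, PySem.Set.contains,
      PySem.List.sorted_eq_foldl_insertBy, PySem.List.insertBy, List.foldl]
  by_cases h2 : c = "New York"
  · subst h2
    simp [CITY_ALIASES, VARIANTS_BY_CANONICAL, PySem.Dict.ofList, PySem.Dict.update, PySem.Dict.getD,
      PySem.Dict.get?, PySem.Dict.empty, PySem.Dict.modify, PySem.Dict.insert, PySem.Dict.contains,
      PySem.Dict.keys, PySem.Set.ofList, PySem.Set.add, PySem.Set.contains,
      PySem.List.sorted_eq_foldl_insertBy, PySem.List.insertBy, List.foldl]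
  by_cases h3 : c = "Los Angeles"
  · subst h3
    simp [CITY_ALIASES, VARIANTS_BY_CANONICAL, PySem.Dict.ofList, PySem.Dict.update, PySem.Dict.getD,
      PySem.Dict.get?, PySem.Dict.empty, PySem.Dict.modify, PySem.Dict.insert, PySem.Dict.contains,
      PySem.Dict.keys, PySem.Set.ofList, PySem.Set.add, PySem.Set.contains,
      PySem.List.sorted_eq_foldl_insertBy, PySem.List.insertBy, List.foldl]
  -- otherwise no alias maps to c and the answer table has no entry for c
  have n1 : "Portland" ≠ c := fun e => h1 e.symm
  have n2 : "New York" ≠ c := fun e => h2 e.symm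
  have n3 : "Los Angeles" ≠ c := fun e => h3 e.symm
  simp [CITY_ALIASES, VARIANTS_BY_CANONICAL, PySem.Dict.ofList, PySem.Dict.update, PySem.Dict.getD,
    PySem.Dict.get?, PySem.Dict.empty, PySem.Dict.modify, PySem.Dict.insert, PySem.Dict.contains,
    PySem.Dict.keys, PySem.Set.ofList, PySem.Set.add, PySem.Set.contains,
    PySem.List.sorted_eq_foldl_insertBy, PySem.List.insertBy, List.foldl, n1, n2, n3]

-- ===== VERDICT (by name: the statement is the Claim_ definition above) =====
theorem city_filter_variants_spec : Claim_equal_city_filter_variants := by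
  intro value _
  unfold Spec_city_filter_variants city_filter_variants city_filter_variants_alt
  by_cases h : canonicalize_city value = ""
  · simp [h]
  · simp only [h, if_false]
    exact body_eq _
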